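-- pv_equiv track=rewrite | github.com/BhavyaDarda/ResearchNinja | backend/utils.py | parse_markdown_headings
-- ===== SOURCE A (Python) =====
-- from typing import Dict, Any, List, Optional
--
-- def parse_markdown_headings(markdown_text: str) -> Dict[str, str]:
--     """
--     Parse markdown text to extract sections based on headings
--     """
--     sections = {}
--     current_section = "Main"
--     current_content = []
--
--     for line in markdown_text.split('\n'):
--         if line.startswith('# '):
--             sections[current_section] = '\n'.join(current_content)
--             current_section = line[2:].strip()
--             current_content = []
--         else:
--             current_content.append(line)
--
--     sections[current_section] = '\n'.join(current_content)
--     return sections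
-- ===== SOURCE B (Python) =====
-- def _span(lines):
--     """Split lines into (block before the first heading line, remainder starting at it)."""
--     for i, l in enumerate(lines):
--         if l.startswith('# '):
--             return lines[:i], lines[i:]
--     return lines, []
--
--
-- def parse_markdown_headings(markdown_text: str):
--     """
--     Parse markdown text to extract sections based on headings
--     """
--     lines = markdown_text.split('\n')
--     body, rest = _span(lines)
--     sections = {"Main": '\n'.join(body)}
--     while rest:
--         head, tail = rest[0], rest[1:]
--         body, rest = _span(tail)
--         sections[head[2:].strip()] = '\n'.join(body)
--     return sections
-- ===== Notes on version B (the rewrite author's own statement) =====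
-- stated objective: alternative
-- what changed: B replaces A's per-line accumulator fold by a span-based decomposition: it splits the line list into maximal chunks at level-1 heading lines (find next heading, slice, repeat) and inserts one whole section per chunk.
import Mathlib
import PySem

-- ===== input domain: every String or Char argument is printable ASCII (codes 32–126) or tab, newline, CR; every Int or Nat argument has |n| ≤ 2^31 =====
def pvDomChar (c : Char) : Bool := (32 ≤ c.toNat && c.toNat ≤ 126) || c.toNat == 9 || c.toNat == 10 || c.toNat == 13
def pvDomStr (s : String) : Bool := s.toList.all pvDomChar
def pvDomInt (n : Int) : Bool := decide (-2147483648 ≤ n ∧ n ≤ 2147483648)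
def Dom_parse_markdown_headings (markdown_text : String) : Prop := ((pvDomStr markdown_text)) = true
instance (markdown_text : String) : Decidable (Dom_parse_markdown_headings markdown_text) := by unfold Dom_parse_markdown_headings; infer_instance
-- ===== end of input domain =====

-- B groups the line list into heading-delimited chunks instead of folding line by line; same cost, different decomposition.

-- ===== PORT A =====
-- the for-loop of A, state = (sections, current_section, current_content)
def pmhGoA (lines : List String) (sections : PySem.Dict String String)
    (current_section : String) (current_content : List String) : PySem.Dict String String :=
  match lines with
  | [] => sections.insert current_section (PySem.Str.join "\n" current_content)
  | line :: rest =>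
    if PySem.Str.startswith line "# " then
      pmhGoA rest (sections.insert current_section (PySem.Str.join "\n" current_content))
        (PySem.Str.strip (PySem.Str.slice line (some 2) none)) []
    else
      pmhGoA rest sections current_section (current_content ++ [line])

def parse_markdown_headings (markdown_text : String) : List (String × String) :=
  (pmhGoA ((PySem.Str.split? markdown_text "\n").getD []) PySem.Dict.empty "Main" []).items

-- ===== PORT B =====
-- _span: lines before the first heading line, and the remainder starting at it
def pmhSpan (lines : List String) : List String × List String :=
  match lines with
  | [] => ([], [])
  | l :: ls =>
    if PySem.Str.startswith l "# " then ([], l :: ls)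
    else
      let p := pmhSpan ls
      (l :: p.1, p.2)

theorem pmhSpan_snd_length_le (lines : List String) : (pmhSpan lines).2.length ≤ lines.length := by
  induction lines with
  | nil => simp [pmhSpan]
  | cons l ls ih =>
    simp only [pmhSpan]
    split
    · simp
    · simpa using Nat.le_succ_of_le ih

-- the while-loop of B: rest always starts with a heading line (or is empty)
def pmhLoopB (rest : List String) (sections : PySem.Dict String String) : PySem.Dict String String :=
  match rest with
  | [] => sections
  | head :: tail =>
    let p := pmhSpan tail
    pmhLoopB p.2 (sections.insert (PySem.Str.strip (PySem.Str.slice head (some 2) none))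
      (PySem.Str.join "\n" p.1))
termination_by rest.length
decreasing_by
  exact Nat.lt_succ_of_le (pmhSpan_snd_length_le tail)

def parse_markdown_headings_alt (markdown_text : String) : List (String × String) :=
  let lines := (PySem.Str.split? markdown_text "\n").getD []
  let p := pmhSpan lines
  (pmhLoopB p.2 (PySem.Dict.empty.insert "Main" (PySem.Str.join "\n" p.1))).items

-- ===== PRECONDITION & SPEC =====
def Spec_parse_markdown_headings (markdown_text : String) (out : List (String × String)) : Prop := out = parse_markdown_headings_alt markdown_text
instance (markdown_text : String) (out : List (String × String)) : Decidable (Spec_parse_markdown_headings markdown_text out) := by unfold Spec_parse_markdown_headings; infer_instance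

-- ===== CLAIM (what is proved, stated in full; the proofs are below) =====
def Claim_equal_parse_markdown_headings : Prop := ∀ (markdown_text : String), Dom_parse_markdown_headings markdown_text → Spec_parse_markdown_headings markdown_text (parse_markdown_headings markdown_text)

-- ===== LEMMAS AND PROOFS =====
-- A's fold from state (d, cs, cc) finishes the current section with the chunk up to the
-- next heading and continues as B's chunk loop.
theorem pmhGoA_eq_loopB (lines : List String) : ∀ (d : PySem.Dict String String) (cs : String) (cc : List String),
    pmhGoA lines d cs cc =
      pmhLoopB (pmhSpan lines).2 (d.insert cs (PySem.Str.join "\n" (cc ++ (pmhSpan lines).1))) := by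
  induction lines with
  | nil => intro d cs cc; simp [pmhGoA, pmhSpan, pmhLoopB]
  | cons l ls ih =>
    intro d cs cc
    simp only [pmhGoA, pmhSpan]
    split
    · rw [ih]
      simp [pmhLoopB]
    · rw [ih]
      simp

theorem parse_markdown_headings_eq (markdown_text : String) :
    parse_markdown_headings markdown_text = parse_markdown_headings_alt markdown_text := by
  unfold parse_markdown_headings parse_markdown_headings_alt
  rw [pmhGoA_eq_loopB]
  simp

-- ===== VERDICT (by name: the statement is the Claim_ definition above) =====
theorem parse_markdown_headings_spec : Claim_equal_parse_markdown_headings := by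
  intro t _
  exact parse_markdown_headings_eq t
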